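-- pv_equiv track=rewrite | github.com/Siddardha-23/portfolio | portfolio-backend/services/linkedin_service.py | _is_personal_domain
-- ===== SOURCE A (Python) =====
-- PERSONAL_DOMAINS = {
--     "gmail.com", "yahoo.com", "hotmail.com", "outlook.com",
--     "icloud.com", "aol.com", "protonmail.com", "mail.com",
--     "live.com", "msn.com", "ymail.com", "googlemail.com",
-- }
--
-- INSTITUTIONAL_DOMAINS = {
--     "asu.edu", "edu", "mit.edu", "stanford.edu", "harvard.edu",
--     "yale.edu", "princeton.edu", "berkeley.edu", "caltech.edu",
--     "cmu.edu", "cornell.edu", "univ", "ac.uk", "org", "gov",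
-- }
--
-- PERSONAL_DOMAIN_TYPOS = {
--     "gmial.com", "gamil.com", "gmai.com", "gmil.com",
--     "gmal.com", "gnail.com", "gmaill.com", "gmali.com", "gimail.com",
--     "gamail.com", "gmsil.com", "gmeil.com", "gmaul.com", "gmaol.com",
--     "gmailcom", "gail.com", "gemail.com", "gmqil.com", "gmaio.com",
--     "gmail.co", "gmail.cm", "gmail.om", "gmail.con", "gmail.cim",
--     "yaho.com", "yahooo.com", "yhoo.com", "yaoo.com", "yhaoo.com",
--     "yahoo.co", "yahoo.cm",
--     "hotmial.com", "hotmal.com", "hotmali.com", "hotmaill.com",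
--     "hotmai.com", "hotamil.com", "hotmail.co",
--     "outlok.com", "outllook.com", "outlookk.com", "outloo.com",
--     "outlool.com", "outlook.co",
-- }
--
-- def _is_personal_domain(domain: str) -> bool:
--     domain = domain.lower().strip()
--     if domain in PERSONAL_DOMAINS or domain in PERSONAL_DOMAIN_TYPOS:
--         return True
--     if domain in INSTITUTIONAL_DOMAINS or any(domain.endswith(f".{inst}") for inst in INSTITUTIONAL_DOMAINS):
--         return False
--     domain_name = domain.split(".")[0]
--     personal_names = {"gmail", "yahoo", "hotmail", "outlook", "icloud", "aol",
--                       "protonmail", "mail", "live", "msn", "ymail", "googlemail"}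
--     for pn in personal_names:
--         if _edit_distance(domain_name, pn) <= 2:
--             return True
--     return False
--
-- def _edit_distance(s1: str, s2: str) -> int:
--     if len(s1) < len(s2):
--         return _edit_distance(s2, s1)
--     if len(s2) == 0:
--         return len(s1)
--     prev_row = range(len(s2) + 1)
--     for i, c1 in enumerate(s1):
--         curr_row = [i + 1]
--         for j, c2 in enumerate(s2):
--             insertions = prev_row[j + 1] + 1
--             deletions = curr_row[j] + 1
--             substitutions = prev_row[j] + (c1 != c2)
--             curr_row.append(min(insertions, deletions, substitutions))
--         prev_row = curr_row
--     return prev_row[-1]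
-- ===== SOURCE B (Python) =====
-- PERSONAL_DOMAINS = {
--     "gmail.com", "yahoo.com", "hotmail.com", "outlook.com",
--     "icloud.com", "aol.com", "protonmail.com", "mail.com",
--     "live.com", "msn.com", "ymail.com", "googlemail.com",
-- }
--
-- INSTITUTIONAL_DOMAINS = {
--     "asu.edu", "edu", "mit.edu", "stanford.edu", "harvard.edu",
--     "yale.edu", "princeton.edu", "berkeley.edu", "caltech.edu",
--     "cmu.edu", "cornell.edu", "univ", "ac.uk", "org", "gov",
-- }
--
-- PERSONAL_DOMAIN_TYPOS = {
--     "gmial.com", "gamil.com", "gmai.com", "gmil.com",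
--     "gmal.com", "gnail.com", "gmaill.com", "gmali.com", "gimail.com",
--     "gamail.com", "gmsil.com", "gmeil.com", "gmaul.com", "gmaol.com",
--     "gmailcom", "gail.com", "gemail.com", "gmqil.com", "gmaio.com",
--     "gmail.co", "gmail.cm", "gmail.om", "gmail.con", "gmail.cim",
--     "yaho.com", "yahooo.com", "yhoo.com", "yaoo.com", "yhaoo.com",
--     "yahoo.co", "yahoo.cm",
--     "hotmial.com", "hotmal.com", "hotmali.com", "hotmaill.com",
--     "hotmai.com", "hotamil.com", "hotmail.co",
--     "outlok.com", "outllook.com", "outlookk.com", "outloo.com",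
--     "outlool.com", "outlook.co",
-- }
--
-- _PERSONAL_NAMES = ["gmail", "yahoo", "hotmail", "outlook", "icloud", "aol",
--                    "protonmail", "mail", "live", "msn", "ymail", "googlemail"]
--
--
-- def _is_within(s1, s2, i, j, k):
--     # Is the edit distance between s1[:i] and s2[:j] at most k?
--     while i and j and s1[i - 1] == s2[j - 1]:
--         i -= 1
--         j -= 1
--     if not i or not j:
--         return max(i, j) <= k
--     if k == 0:
--         return False
--     return (_is_within(s1, s2, i - 1, j - 1, k - 1)
--             or _is_within(s1, s2, i - 1, j, k - 1)
--             or _is_within(s1, s2, i, j - 1, k - 1))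
--
--
-- def _is_personal_domain(domain: str) -> bool:
--     d = domain.lower().strip()
--     if d in PERSONAL_DOMAINS or d in PERSONAL_DOMAIN_TYPOS:
--         return True
--     if d in INSTITUTIONAL_DOMAINS or any(d.endswith("." + inst) for inst in INSTITUTIONAL_DOMAINS):
--         return False
--     name = d.split(".")[0]
--     return any(_is_within(name, pn, len(name), len(pn), 2) for pn in _PERSONAL_NAMES)
-- ===== Notes on version B (the rewrite author's own statement) =====
-- stated objective: faster
-- what changed: The two-row Wagner-Fischer DP that computes the full edit distance for every candidate name is replaced by a threshold search _is_within(s1,s2,i,j,k) that strips the common suffix iteratively and branches on at most k=2 edits (<=13 nodes), deciding 'distance <= 2' without ever building DP rows.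
import Mathlib
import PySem

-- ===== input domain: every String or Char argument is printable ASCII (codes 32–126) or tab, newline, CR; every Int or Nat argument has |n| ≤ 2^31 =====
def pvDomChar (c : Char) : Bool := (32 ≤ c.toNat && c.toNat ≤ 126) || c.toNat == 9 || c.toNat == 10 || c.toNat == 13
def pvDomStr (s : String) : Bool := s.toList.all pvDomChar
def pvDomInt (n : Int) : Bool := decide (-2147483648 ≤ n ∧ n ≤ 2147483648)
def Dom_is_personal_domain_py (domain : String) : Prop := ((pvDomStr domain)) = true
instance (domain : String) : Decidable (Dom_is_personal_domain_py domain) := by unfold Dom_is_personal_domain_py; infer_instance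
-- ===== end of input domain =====

-- B replaces A's full two-row edit-distance DP by a depth-≤-2 branching search that only decides 'edit distance ≤ 2'.

-- ===== PORT A =====
-- module-level set constants (Python sets of string literals; only membership tests / iteration into a bool are used)
def PERSONAL_DOMAINS : List String :=
  ["gmail.com", "yahoo.com", "hotmail.com", "outlook.com",
   "icloud.com", "aol.com", "protonmail.com", "mail.com",
   "live.com", "msn.com", "ymail.com", "googlemail.com"]

def INSTITUTIONAL_DOMAINS : List String :=
  ["asu.edu", "edu", "mit.edu", "stanford.edu", "harvard.edu",
   "yale.edu", "princeton.edu", "berkeley.edu", "caltech.edu",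
   "cmu.edu", "cornell.edu", "univ", "ac.uk", "org", "gov"]

def PERSONAL_DOMAIN_TYPOS : List String :=
  ["gmial.com", "gamil.com", "gmai.com", "gmil.com",
   "gmal.com", "gnail.com", "gmaill.com", "gmali.com", "gimail.com",
   "gamail.com", "gmsil.com", "gmeil.com", "gmaul.com", "gmaol.com",
   "gmailcom", "gail.com", "gemail.com", "gmqil.com", "gmaio.com",
   "gmail.co", "gmail.cm", "gmail.om", "gmail.con", "gmail.cim",
   "yaho.com", "yahooo.com", "yhoo.com", "yaoo.com", "yhaoo.com",
   "yahoo.co", "yahoo.cm",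
   "hotmial.com", "hotmal.com", "hotmali.com", "hotmaill.com",
   "hotmai.com", "hotamil.com", "hotmail.co",
   "outlok.com", "outllook.com", "outlookk.com", "outloo.com",
   "outlool.com", "outlook.co"]

def PERSONAL_NAMES : List String :=
  ["gmail", "yahoo", "hotmail", "outlook", "icloud", "aol",
   "protonmail", "mail", "live", "msn", "ymail", "googlemail"]

-- _edit_distance: two-row DP; rows are lists of Nat and are indexed exactly as Python indexes
-- them (pyGetD with Python's index; every DP index is in range, prev_row[-1] is Python's [-1]).
def edit_distance_py (s1 s2 : List Char) : Nat :=
  if h : s1.length < s2.length then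
    edit_distance_py s2 s1
  else if s2.length = 0 then
    s1.length
  else
    PySem.List.pyGetD
      ((PySem.List.enumerate s1 0).foldl
        (fun prev ic =>
          (PySem.List.enumerate s2 0).foldl
            (fun curr jc =>
              curr ++ [min (PySem.List.pyGetD prev (jc.1 + 1) 0 + 1)
                (min (PySem.List.pyGetD curr jc.1 0 + 1)
                  (PySem.List.pyGetD prev jc.1 0 + (if ic.2 = jc.2 then 0 else 1)))])
            [ic.1.toNat + 1])
        (List.range (s2.length + 1)))
      (-1) 0
termination_by (if s1.length < s2.length then 1 else 0)
decreasing_by simp only [if_pos h, if_neg (by omega : ¬ s2.length < s1.length)]; omega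

-- the 'for pn in personal_names: if _edit_distance(...) <= 2: return True / return False' loop
def personalLoop (name : String) : List String → Bool
  | [] => false
  | pn :: rest =>
    if edit_distance_py name.toList pn.toList ≤ 2 then true else personalLoop name rest

def is_personal_domain_py (domain : String) : Bool :=
  let d := PySem.Str.strip (PySem.Str.lower domain)
  if PERSONAL_DOMAINS.contains d || PERSONAL_DOMAIN_TYPOS.contains d then
    true
  else if INSTITUTIONAL_DOMAINS.contains d
          || INSTITUTIONAL_DOMAINS.any (fun inst => PySem.Str.endswith d ("." ++ inst)) then
    false
  else
    -- domain.split(".")[0]: the separator is nonempty so split? is some, and the list is never empty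
    personalLoop (PySem.List.pyGetD ((PySem.Str.split? d ".").getD []) 0 "") PERSONAL_NAMES

-- ===== PORT B =====
-- the 'while i and j and s1[i-1] == s2[j-1]: i -= 1; j -= 1' loop of _is_within
-- (every index is in range whenever the function is reached from _is_personal_domain)
def stripEq (s1 s2 : List Char) : Nat → Nat → Nat × Nat
  | 0, j => (0, j)
  | i + 1, 0 => (i + 1, 0)
  | i + 1, j + 1 =>
    if PySem.List.pyGetD s1 (i : Int) ' ' = PySem.List.pyGetD s2 (j : Int) ' ' then
      stripEq s1 s2 i j
    else (i + 1, j + 1)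

-- _is_within(s1, s2, i, j, k): edit distance of s1[:i] and s2[:j] at most k?
def isWithin (s1 s2 : List Char) (i j k : Nat) : Bool :=
  match stripEq s1 s2 i j, k with
  | (0, j'), k => decide (j' ≤ k)
  | (i' + 1, 0), k => decide (i' + 1 ≤ k)
  | (_ + 1, _ + 1), 0 => false
  | (i' + 1, j' + 1), k' + 1 =>
    isWithin s1 s2 i' j' k' || isWithin s1 s2 i' (j' + 1) k' || isWithin s1 s2 (i' + 1) j' k'
termination_by k

def is_personal_domain_py_alt (domain : String) : Bool :=
  let d := PySem.Str.strip (PySem.Str.lower domain)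
  if PERSONAL_DOMAINS.contains d || PERSONAL_DOMAIN_TYPOS.contains d then
    true
  else if INSTITUTIONAL_DOMAINS.contains d
          || INSTITUTIONAL_DOMAINS.any (fun inst => PySem.Str.endswith d ("." ++ inst)) then
    false
  else
    let name := PySem.List.pyGetD ((PySem.Str.split? d ".").getD []) 0 ""
    PERSONAL_NAMES.any (fun pn =>
      isWithin name.toList pn.toList name.toList.length pn.toList.length 2)

-- ===== PRECONDITION & SPEC =====
def Spec_is_personal_domain_py (domain : String) (out : Bool) : Prop := out = is_personal_domain_py_alt domain
instance (domain : String) (out : Bool) : Decidable (Spec_is_personal_domain_py domain out) := by unfold Spec_is_personal_domain_py; infer_instance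

-- ===== CLAIM (what is proved, stated in full; the proofs are below) =====
def Claim_equal_is_personal_domain_py : Prop := ∀ (domain : String), Dom_is_personal_domain_py domain → Spec_is_personal_domain_py domain (is_personal_domain_py domain)

-- ===== LEMMAS AND PROOFS =====

-- prefix edit distance in the DP ('min of three') form: the value A's rows hold
def recM (s1 s2 : List Char) : Nat → Nat → Nat
  | 0, j => j
  | i + 1, 0 => i + 1
  | i + 1, j + 1 =>
    min (recM s1 s2 i (j + 1) + 1)
      (min (recM s1 s2 (i + 1) j + 1)
        (recM s1 s2 i j + (if s1.getD i ' ' = s2.getD j ' ' then 0 else 1)))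
termination_by i j => i + j

-- prefix edit distance in the shortcut ('equal last chars skip') form: the value B's search bounds
def recB (s1 s2 : List Char) : Nat → Nat → Nat
  | 0, j => j
  | i + 1, 0 => i + 1
  | i + 1, j + 1 =>
    if s1.getD i ' ' = s2.getD j ' ' then
      recB s1 s2 i j
    else
      1 + min (recB s1 s2 i j) (min (recB s1 s2 (i + 1) j) (recB s1 s2 i (j + 1)))
termination_by i j => i + j

theorem recM_zl (s1 s2 : List Char) (j : Nat) : recM s1 s2 0 j = j := by simp [recM]
theorem recM_sz (s1 s2 : List Char) (i : Nat) : recM s1 s2 (i + 1) 0 = i + 1 := by simp [recM]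
theorem recM_ss (s1 s2 : List Char) (i j : Nat) :
    recM s1 s2 (i + 1) (j + 1)
      = min (recM s1 s2 i (j + 1) + 1)
          (min (recM s1 s2 (i + 1) j + 1)
            (recM s1 s2 i j + (if s1.getD i ' ' = s2.getD j ' ' then 0 else 1))) := by
  simp only [recM]

theorem recM_zero_right (s1 s2 : List Char) (i : Nat) : recM s1 s2 i 0 = i := by
  cases i with
  | zero => rw [recM_zl]
  | succ n => rw [recM_sz]

theorem recB_zl (s1 s2 : List Char) (j : Nat) : recB s1 s2 0 j = j := by simp [recB]
theorem recB_sz (s1 s2 : List Char) (i : Nat) : recB s1 s2 (i + 1) 0 = i + 1 := by simp [recB]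
theorem recB_ss (s1 s2 : List Char) (i j : Nat) :
    recB s1 s2 (i + 1) (j + 1)
      = if s1.getD i ' ' = s2.getD j ' ' then recB s1 s2 i j
        else 1 + min (recB s1 s2 i j) (min (recB s1 s2 (i + 1) j) (recB s1 s2 i (j + 1))) := by
  simp only [recB]

theorem recB_zero_right (s1 s2 : List Char) (i : Nat) : recB s1 s2 i 0 = i := by
  cases i with
  | zero => rw [recB_zl]
  | succ n => rw [recB_sz]

theorem nat_pair_strong {P : Nat → Nat → Prop}
    (step : ∀ i j, (∀ i' j', i' + j' < i + j → P i' j') → P i j) : ∀ i j, P i j := by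
  have H : ∀ n i j, i + j ≤ n → P i j := by
    intro n
    induction n with
    | zero => intro i j h; exact step i j (fun i' j' h' => absurd h' (by omega))
    | succ n ih => intro i j h; exact step i j (fun i' j' h' => ih i' j' (by omega))
  exact fun i j => H (i + j) i j le_rfl

theorem recM_lb (s1 s2 : List Char) :
    ∀ i j, j ≤ recM s1 s2 i j + i ∧ i ≤ recM s1 s2 i j + j := by
  refine nat_pair_strong (fun i j ih => ?_)
  rcases i with _ | i
  · rw [recM_zl]; omega
  · rcases j with _ | j
    · rw [recM_sz]; omega
    · have h1 := ih i (j + 1) (by omega)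
      have h2 := ih (i + 1) j (by omega)
      have h3 := ih i j (by omega)
      rw [recM_ss]
      split_ifs <;> omega

theorem recM_le_succ_left (s1 s2 : List Char) :
    ∀ i j, recM s1 s2 i j ≤ recM s1 s2 (i + 1) j + 1 := by
  refine nat_pair_strong (fun i j ih => ?_)
  rcases j with _ | j
  · rw [recM_zero_right, recM_zero_right]; omega
  · rcases i with _ | i
    · have hlb := (recM_lb s1 s2 1 (j + 1)).1
      rw [recM_zl]; omega
    · have ih1 := ih (i + 1) j (by omega)
      rw [recM_ss s1 s2 (i + 1) j, recM_ss s1 s2 i j]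
      split_ifs <;> omega

theorem recM_le_succ_right (s1 s2 : List Char) :
    ∀ i j, recM s1 s2 i j ≤ recM s1 s2 i (j + 1) + 1 := by
  refine nat_pair_strong (fun i j ih => ?_)
  rcases i with _ | i
  · rw [recM_zl, recM_zl]; omega
  · rcases j with _ | j
    · have hlb := (recM_lb s1 s2 (i + 1) 1).2
      rw [recM_zero_right]; omega
    · have ih1 := ih i (j + 1) (by omega)
      rw [recM_ss s1 s2 i (j + 1), recM_ss s1 s2 i j]
      split_ifs <;> omega

theorem recM_eq_recB (s1 s2 : List Char) : ∀ i j, recM s1 s2 i j = recB s1 s2 i j := by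
  refine nat_pair_strong (fun i j ih => ?_)
  rcases i with _ | i
  · rw [recM_zl, recB_zl]
  · rcases j with _ | j
    · rw [recM_sz, recB_sz]
    · have e1 := ih i j (by omega)
      have e2 := ih (i + 1) j (by omega)
      have e3 := ih i (j + 1) (by omega)
      have hL := recM_le_succ_left s1 s2 i j
      have hR := recM_le_succ_right s1 s2 i j
      rw [recM_ss, recB_ss]
      split_ifs <;> omega

theorem recB_symm (s1 s2 : List Char) : ∀ i j, recB s1 s2 i j = recB s2 s1 j i := by
  refine nat_pair_strong (fun i j ih => ?_)
  rcases i with _ | i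
  · rw [recB_zl, recB_zero_right]
  · rcases j with _ | j
    · rw [recB_zero_right, recB_zl]
    · have e1 := ih i j (by omega)
      have e2 := ih (i + 1) j (by omega)
      have e3 := ih i (j + 1) (by omega)
      rw [recB_ss s1 s2 i j, recB_ss s2 s1 j i]
      by_cases hc : s1.getD i ' ' = s2.getD j ' '
      · rw [if_pos hc, if_pos hc.symm]; exact e1
      · rw [if_neg hc, if_neg (fun e => hc e.symm)]; omega

-- ---- A's DP computes recM ----

def rowOf (s1 s2 : List Char) (i : Nat) : List Nat :=
  (List.range (s2.length + 1)).map (recM s1 s2 i)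

theorem dp_inner (s1 s2 : List Char) (i : Nat) : ∀ m, m ≤ s2.length →
    (PySem.List.pyRange 0 (m : Int) 1).foldl
      (fun curr j =>
        curr ++ [min (PySem.List.pyGetD (rowOf s1 s2 i) (j + 1) 0 + 1)
          (min (PySem.List.pyGetD curr j 0 + 1)
            (PySem.List.pyGetD (rowOf s1 s2 i) j 0 +
              (if PySem.List.pyGetD s1 (i : Int) ' ' = PySem.List.pyGetD s2 j ' ' then 0 else 1)))])
      [i + 1]
    = (List.range (m + 1)).map (recM s1 s2 (i + 1)) := by
  intro m
  induction m with
  | zero =>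
    intro _
    simp only [Nat.cast_zero]
    rw [PySem.List.pyRange_one_eq_nil le_rfl, List.foldl_nil, List.range_one]
    simp [recM_sz]
  | succ m ih =>
    intro hm
    rw [show ((m + 1 : Nat) : Int) = (m : Int) + 1 from by push_cast; ring,
        PySem.List.pyRange_one_succ_right (by exact_mod_cast Nat.zero_le m),
        List.foldl_append, ih (by omega), List.foldl_cons, List.foldl_nil]
    simp only [rowOf]
    rw [show ((m : Int) + 1) = ((m + 1 : Nat) : Int) from by push_cast; ring]
    simp only [PySem.List.pyGetD_natCast]
    rw [PySem.List.getD_map_range (recM s1 s2 i) (s2.length + 1) (m + 1) 0 (by omega),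
        PySem.List.getD_map_range (recM s1 s2 (i + 1)) (m + 1) m 0 (by omega),
        PySem.List.getD_map_range (recM s1 s2 i) (s2.length + 1) m 0 (by omega)]
    rw [List.range_succ (n := m + 1), List.map_append]
    simp only [List.map_cons, List.map_nil]
    rw [recM_ss s1 s2 i m]

theorem inner_step (s1 s2 : List Char) (i : Nat) (prev : List Nat)
    (hprev : prev = rowOf s1 s2 i) :
    (PySem.List.enumerate s2 0).foldl
      (fun curr jc =>
        curr ++ [min (PySem.List.pyGetD prev (jc.1 + 1) 0 + 1)
          (min (PySem.List.pyGetD curr jc.1 0 + 1)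
            (PySem.List.pyGetD prev jc.1 0 +
              (if PySem.List.pyGetD s1 (i : Int) ' ' = jc.2 then 0 else 1)))])
      [((i : Int)).toNat + 1]
    = rowOf s1 s2 (i + 1) := by
  subst hprev
  have he := PySem.List.enumerate_eq_map_pyRange s2 ' '
  rw [he, List.foldl_map]
  exact dp_inner s1 s2 i s2.length le_rfl

theorem dp_all (s1 s2 : List Char) : ∀ m, m ≤ s1.length →
    (PySem.List.pyRange 0 (m : Int) 1).foldl
      (fun prev (i : Int) =>
        (PySem.List.enumerate s2 0).foldl
          (fun curr jc =>
            curr ++ [min (PySem.List.pyGetD prev (jc.1 + 1) 0 + 1)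
              (min (PySem.List.pyGetD curr jc.1 0 + 1)
                (PySem.List.pyGetD prev jc.1 0 +
                  (if PySem.List.pyGetD s1 i ' ' = jc.2 then 0 else 1)))])
          [i.toNat + 1])
      (List.range (s2.length + 1))
    = rowOf s1 s2 m := by
  intro m
  induction m with
  | zero =>
    intro _
    simp only [Nat.cast_zero]
    rw [PySem.List.pyRange_one_eq_nil le_rfl, List.foldl_nil]
    unfold rowOf
    rw [show recM s1 s2 0 = id from funext (fun j => recM_zl s1 s2 j), List.map_id]
  | succ m ih =>
    intro hm
    rw [show ((m + 1 : Nat) : Int) = (m : Int) + 1 from by push_cast; ring,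
        PySem.List.pyRange_one_succ_right (by exact_mod_cast Nat.zero_le m),
        List.foldl_append, ih (by omega), List.foldl_cons, List.foldl_nil]
    exact inner_step s1 s2 m (rowOf s1 s2 m) rfl

theorem dp_full (s1 s2 : List Char) :
    (PySem.List.enumerate s1 0).foldl
      (fun prev ic =>
        (PySem.List.enumerate s2 0).foldl
          (fun curr jc =>
            curr ++ [min (PySem.List.pyGetD prev (jc.1 + 1) 0 + 1)
              (min (PySem.List.pyGetD curr jc.1 0 + 1)
                (PySem.List.pyGetD prev jc.1 0 + (if ic.2 = jc.2 then 0 else 1)))])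
          [ic.1.toNat + 1])
      (List.range (s2.length + 1))
    = rowOf s1 s2 s1.length := by
  have he := PySem.List.enumerate_eq_map_pyRange s1 ' '
  rw [he, List.foldl_map]
  exact dp_all s1 s2 s1.length le_rfl

theorem pyGetD_last_rowOf (s1 s2 : List Char) (m : Nat) :
    PySem.List.pyGetD (rowOf s1 s2 m) (-1) 0 = recM s1 s2 m s2.length := by
  unfold rowOf
  rw [List.range_succ, List.map_append]
  simp only [List.map_cons, List.map_nil, PySem.List.pyGetD_neg_one_append_singleton]

theorem edit_aux (s1 s2 : List Char) (h : ¬ s1.length < s2.length) :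
    edit_distance_py s1 s2 = recM s1 s2 s1.length s2.length := by
  rw [edit_distance_py.eq_def, dif_neg h]
  by_cases hz : s2.length = 0
  · rw [if_pos hz, hz, recM_zero_right]
  · rw [if_neg hz, dp_full s1 s2]
    exact pyGetD_last_rowOf s1 s2 s1.length

theorem edit_eq (s1 s2 : List Char) :
    edit_distance_py s1 s2 = recB s1 s2 s1.length s2.length := by
  by_cases h : s1.length < s2.length
  · rw [edit_distance_py.eq_def, dif_pos h, edit_aux s2 s1 (by omega),
        recM_eq_recB s2 s1, recB_symm s2 s1]
  · rw [edit_aux s1 s2 h, recM_eq_recB s1 s2]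

-- ---- B's search decides 'recB ≤ k' ----

theorem stripEq_zl (s1 s2 : List Char) (j : Nat) : stripEq s1 s2 0 j = (0, j) := by simp [stripEq]
theorem stripEq_sz (s1 s2 : List Char) (i : Nat) : stripEq s1 s2 (i + 1) 0 = (i + 1, 0) := by
  simp [stripEq]
theorem stripEq_ss (s1 s2 : List Char) (i j : Nat) :
    stripEq s1 s2 (i + 1) (j + 1)
      = if s1.getD i ' ' = s2.getD j ' ' then stripEq s1 s2 i j else (i + 1, j + 1) := by
  simp [stripEq]

theorem stripEq_recB (s1 s2 : List Char) :
    ∀ i j, recB s1 s2 i j = recB s1 s2 (stripEq s1 s2 i j).1 (stripEq s1 s2 i j).2 := by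
  refine nat_pair_strong (fun i j ih => ?_)
  rcases i with _ | i
  · rw [stripEq_zl]
  · rcases j with _ | j
    · rw [stripEq_sz]
    · rw [stripEq_ss s1 s2 i j]
      by_cases hc : s1.getD i ' ' = s2.getD j ' '
      · rw [if_pos hc, recB_ss s1 s2 i j, if_pos hc]; exact ih i j (by omega)
      · rw [if_neg hc]

theorem stripEq_ne (s1 s2 : List Char) :
    ∀ i j i' j', stripEq s1 s2 i j = (i' + 1, j' + 1) → ¬ (s1.getD i' ' ' = s2.getD j' ' ') := by
  refine nat_pair_strong (fun i j ih => ?_)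
  intro i' j' hst
  rcases i with _ | i
  · rw [stripEq_zl] at hst; cases hst
  · rcases j with _ | j
    · rw [stripEq_sz] at hst; cases hst
    · rw [stripEq_ss] at hst
      by_cases hc : s1.getD i ' ' = s2.getD j ' '
      · rw [if_pos hc] at hst; exact ih i j (by omega) i' j' hst
      · rw [if_neg hc] at hst
        injection hst with h1 h2
        have hi : i' = i := by omega
        have hj : j' = j := by omega
        subst hi; subst hj
        exact hc

theorem isWithin_iff (s1 s2 : List Char) :
    ∀ k i j, isWithin s1 s2 i j k = true ↔ recB s1 s2 i j ≤ k := by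
  intro k
  induction k with
  | zero =>
    intro i j
    rw [isWithin.eq_def]
    split
    · rename_i j' hst
      rw [stripEq_recB s1 s2 i j, hst]
      dsimp only
      simp [recB_zl]
    · rename_i i' hst
      rw [stripEq_recB s1 s2 i j, hst]
      dsimp only
      simp [recB_zero_right]
    · rename_i i' j' hst hk
      have hne := stripEq_ne s1 s2 i j i' j' hst
      rw [stripEq_recB s1 s2 i j, hst]
      have hproj : recB s1 s2 (i' + 1, j' + 1).1 (i' + 1, j' + 1).2
          = recB s1 s2 (i' + 1) (j' + 1) := rfl
      try rw [hproj]
      rw [recB_ss s1 s2 i' j', if_neg hne]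
      simp only [Bool.false_eq_true, false_iff, not_le]
      omega
    · rename_i i' j' k'' hst hk
      exact absurd hk (by omega)
  | succ k' ihk =>
    intro i j
    rw [isWithin.eq_def]
    split
    · rename_i j' hst
      rw [stripEq_recB s1 s2 i j, hst]
      dsimp only
      simp [recB_zl]
    · rename_i i' hst
      rw [stripEq_recB s1 s2 i j, hst]
      dsimp only
      simp [recB_zero_right]
    · rename_i i' j' hst hk
      exact absurd hk (by omega)
    · rename_i i' j' k'' hst hk
      have hkk : k'' = k' := by omega
      subst hkk
      have hne := stripEq_ne s1 s2 i j i' j' hst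
      rw [stripEq_recB s1 s2 i j, hst]
      have hproj : recB s1 s2 (i' + 1, j' + 1).1 (i' + 1, j' + 1).2
          = recB s1 s2 (i' + 1) (j' + 1) := rfl
      try rw [hproj]
      rw [recB_ss s1 s2 i' j', if_neg hne]
      simp only [Bool.or_eq_true, ihk]
      omega

theorem personalLoop_eq_any (name : String) (l : List String) :
    personalLoop name l
      = l.any (fun pn =>
          isWithin name.toList pn.toList name.toList.length pn.toList.length 2) := by
  induction l with
  | nil => simp [personalLoop]
  | cons pn rest ih =>
    simp only [personalLoop, List.any_cons]
    by_cases h : edit_distance_py name.toList pn.toList ≤ 2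
    · rw [if_pos h]
      have hw : isWithin name.toList pn.toList name.toList.length pn.toList.length 2 = true :=
        (isWithin_iff name.toList pn.toList 2 _ _).mpr (by rw [← edit_eq]; exact h)
      rw [hw]; simp
    · rw [if_neg h, ih]
      cases hb : isWithin name.toList pn.toList name.toList.length pn.toList.length 2 with
      | false => simp
      | true =>
        exact absurd (by rw [edit_eq]; exact (isWithin_iff name.toList pn.toList 2 _ _).mp hb) h

-- ===== VERDICT (by name: the statement is the Claim_ definition above) =====
theorem is_personal_domain_py_spec : Claim_equal_is_personal_domain_py := by
  intro domain _
  unfold Spec_is_personal_domain_py is_personal_domain_py is_personal_domain_py_alt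
  simp only [personalLoop_eq_any]
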